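-- pv_equiv track=rewrite | github.com/wanjau2/careerGenie | services/skill_recommendation.py | _identify_priority_skills
-- ===== SOURCE A (Python) =====
-- def _identify_priority_skills(all_skills, target_roles, target_industries):
--     """Identify priority skills based on market demand and user goals."""
--     priority_skills = []
--
--     # Skills with high priority
--     high_priority = [skill for skill in all_skills if skill.get('priority') == 'high']
--
--     # Add top 20 high-priority skills
--     priority_skills.extend(high_priority[:20])
--
--     # If less than 20, add some medium priority skills
--     if len(priority_skills) < 20:
--         medium_priority = [skill for skill in all_skills if skill.get('priority') == 'medium']
--         priority_skills.extend(medium_priority[:20 - len(priority_skills)])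
--
--     return priority_skills
-- ===== SOURCE B (Python) =====
-- def _identify_priority_skills(all_skills, target_roles, target_industries):
--     """Stable sort of the relevant skills by priority rank, then truncate to 20."""
--     rank = {'high': 0, 'medium': 1}
--     kept = [s for s in all_skills if s.get('priority') in rank]
--     return sorted(kept, key=lambda s: rank.get(s.get('priority'), 2))[:20]
-- ===== Notes on version B (the rewrite author's own statement) =====
-- stated objective: alternative
-- what changed: Replaces A's filter-highs-then-maybe-filter-and-append-mediums with a stable sort of the high/medium skills by a priority-rank key followed by a single truncation to 20; stability preserves source order inside each rank, so the sorted list is exactly highs-then-mediums and its first 20 elements coincide with A's fill arithmetic.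
import Mathlib
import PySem

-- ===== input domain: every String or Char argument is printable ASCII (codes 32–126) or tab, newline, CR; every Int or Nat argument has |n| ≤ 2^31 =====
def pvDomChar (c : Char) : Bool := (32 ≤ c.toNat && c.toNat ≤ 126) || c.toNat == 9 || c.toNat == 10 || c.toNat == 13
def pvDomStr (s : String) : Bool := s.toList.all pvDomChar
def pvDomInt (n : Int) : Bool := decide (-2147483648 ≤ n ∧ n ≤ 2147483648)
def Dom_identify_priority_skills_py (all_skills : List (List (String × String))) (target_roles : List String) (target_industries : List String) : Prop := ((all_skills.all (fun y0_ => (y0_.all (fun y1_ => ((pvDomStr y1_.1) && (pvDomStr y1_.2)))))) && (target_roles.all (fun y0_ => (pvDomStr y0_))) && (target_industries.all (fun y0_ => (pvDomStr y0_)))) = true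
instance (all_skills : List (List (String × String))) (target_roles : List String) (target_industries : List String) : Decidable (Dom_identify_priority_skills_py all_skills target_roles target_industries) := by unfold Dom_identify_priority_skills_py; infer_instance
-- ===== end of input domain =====

-- B replaces A's filter-and-fill (filter highs, maybe filter and append mediums) by a stable
-- sort of the relevant skills by a priority rank followed by one truncation (alternative algorithm, same result).

-- ===== PORT A =====
-- skill.get('priority'): first-match lookup in the association list
def pvGetPriority (skill : List (String × String)) : Option String :=
  (skill.find? (fun kv => kv.1 == "priority")).map (fun kv => kv.2)

def identify_priority_skills_py (all_skills : List (List (String × String))) (target_roles : List String) (target_industries : List String) : List (List (String × String)) :=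
  let high_priority := all_skills.filter (fun skill => pvGetPriority skill == some "high")
  let priority_skills := PySem.List.slice high_priority none (some 20)
  if priority_skills.length < 20 then
    let medium_priority := all_skills.filter (fun skill => pvGetPriority skill == some "medium")
    priority_skills ++ PySem.List.slice medium_priority none (some (20 - (priority_skills.length : Int)))
  else
    priority_skills

-- ===== PORT B =====
-- rank = {'high': 0, 'medium': 1}
def pvRankDict : PySem.Dict String Int := PySem.Dict.ofList [("high", 0), ("medium", 1)]

-- s.get('priority') in rank  (None is never a key of rank)
def pvInRank (s : List (String × String)) : Bool :=
  match pvGetPriority s with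
  | none => false
  | some p => (PySem.Dict.get? pvRankDict p).isSome

-- rank.get(s.get('priority'), 2)
def pvRank (s : List (String × String)) : Int :=
  match pvGetPriority s with
  | none => 2
  | some p => PySem.Dict.getD pvRankDict p 2

def identify_priority_skills_py_alt (all_skills : List (List (String × String))) (target_roles : List String) (target_industries : List String) : List (List (String × String)) :=
  let kept := all_skills.filter pvInRank
  PySem.List.slice (PySem.List.sorted kept pvRank false) none (some 20)

-- ===== PRECONDITION & SPEC =====
def Spec_identify_priority_skills_py (all_skills : List (List (String × String))) (target_roles : List String) (target_industries : List String) (out : List (List (String × String))) : Prop := out = identify_priority_skills_py_alt all_skills target_roles target_industries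
instance (all_skills : List (List (String × String))) (target_roles : List String) (target_industries : List String) (out : List (List (String × String))) : Decidable (Spec_identify_priority_skills_py all_skills target_roles target_industries out) := by unfold Spec_identify_priority_skills_py; infer_instance

-- ===== CLAIM (what is proved, stated in full; the proofs are below) =====
def Claim_equal_identify_priority_skills_py : Prop := ∀ (all_skills : List (List (String × String))) (target_roles : List String) (target_industries : List String), Dom_identify_priority_skills_py all_skills target_roles target_industries → Spec_identify_priority_skills_py all_skills target_roles target_industries (identify_priority_skills_py all_skills target_roles target_industries)

-- ===== LEMMAS AND PROOFS =====

lemma pvRankDict_items : pvRankDict.items = [("high", (0:Int)), ("medium", 1)] := by decide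

-- pvRank takes only the values 0 (high), 1 (medium), 2 (otherwise)
lemma pvRank_high (s : List (String × String)) :
    pvRank s = 0 ↔ pvGetPriority s = some "high" := by
  unfold pvRank
  cases h : pvGetPriority s with
  | none => simp
  | some p =>
    by_cases hp : p = "high"
    · subst hp; simp [PySem.Dict.getD, PySem.Dict.get?, pvRankDict_items]
    · by_cases hm : p = "medium"
      · subst hm; simp [PySem.Dict.getD, PySem.Dict.get?, pvRankDict_items]
      · have e1 : ("high" == p) = false := by simp [Ne.symm hp]
        have e2 : ("medium" == p) = false := by simp [Ne.symm hm]
        simp [PySem.Dict.getD, PySem.Dict.get?, pvRankDict_items, List.find?, e1, e2, hp]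

lemma pvRank_medium (s : List (String × String)) :
    pvRank s = 1 ↔ pvGetPriority s = some "medium" := by
  unfold pvRank
  cases h : pvGetPriority s with
  | none => simp
  | some p =>
    by_cases hp : p = "high"
    · subst hp; simp [PySem.Dict.getD, PySem.Dict.get?, pvRankDict_items]
    · by_cases hm : p = "medium"
      · subst hm; simp [PySem.Dict.getD, PySem.Dict.get?, pvRankDict_items]
      · have e1 : ("high" == p) = false := by simp [Ne.symm hp]
        have e2 : ("medium" == p) = false := by simp [Ne.symm hm]
        simp [PySem.Dict.getD, PySem.Dict.get?, pvRankDict_items, List.find?, e1, e2, hm]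

lemma pvInRank_iff (s : List (String × String)) :
    pvInRank s = true ↔ pvRank s = 0 ∨ pvRank s = 1 := by
  unfold pvInRank
  rw [pvRank_high, pvRank_medium]
  cases h : pvGetPriority s with
  | none => simp
  | some p =>
    by_cases hp : p = "high"
    · subst hp; simp [PySem.Dict.get?, pvRankDict_items]
    · by_cases hm : p = "medium"
      · subst hm; simp [PySem.Dict.get?, pvRankDict_items]
      · have e1 : ("high" == p) = false := by simp [Ne.symm hp]
        have e2 : ("medium" == p) = false := by simp [Ne.symm hm]
        simp [PySem.Dict.get?, pvRankDict_items, List.find?, e1, e2, hp, hm]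

-- insertBy skips a prefix it is not 'before'
lemma insertBy_append_left {α : Type} (before : α → α → Bool) (x : α)
    (A B : List α) (hA : ∀ a ∈ A, before x a = false) :
    PySem.List.insertBy before x (A ++ B) = A ++ PySem.List.insertBy before x B := by
  induction A with
  | nil => simp
  | cons a as ih =>
    have ha : before x a = false := hA a (by simp)
    simp only [List.cons_append, PySem.List.insertBy, ha, Bool.false_eq_true, if_false]
    rw [ih (fun a ha' => hA a (by simp [ha']))]

-- insertBy goes to the front of a list it is entirely 'before'
lemma insertBy_all_before {α : Type} (before : α → α → Bool) (x : α)
    (B : List α) (hB : ∀ b ∈ B, before x b = true) :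
    PySem.List.insertBy before x B = x :: B := by
  cases B with
  | nil => simp [PySem.List.insertBy]
  | cons b bs => simp [PySem.List.insertBy, hB b (by simp)]

-- the insertion-sort fold on a two-valued rank is the stable partition
lemma pv_foldl_ins (xs A B : List (List (String × String)))
    (hA : ∀ a ∈ A, pvRank a = 0) (hB : ∀ b ∈ B, pvRank b = 1)
    (hxs : ∀ x ∈ xs, pvRank x = 0 ∨ pvRank x = 1) :
    xs.foldl (fun acc x => PySem.List.insertBy (fun a b => decide (pvRank a < pvRank b)) x acc) (A ++ B)
      = (A ++ xs.filter (fun s => pvRank s == 0)) ++ (B ++ xs.filter (fun s => pvRank s == 1)) := by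
  induction xs generalizing A B with
  | nil => simp
  | cons x xs ih =>
    simp only [List.foldl_cons, List.filter_cons]
    rcases hxs x (by simp) with h0 | h1
    · have hstep : PySem.List.insertBy (fun a b => decide (pvRank a < pvRank b)) x (A ++ B)
          = (A ++ [x]) ++ B := by
        rw [insertBy_append_left _ _ A B (fun a ha => by simp [hA a ha, h0])]
        rw [insertBy_all_before _ _ B (fun b hb => by simp [hB b hb, h0])]
        simp
      rw [hstep, ih (A ++ [x]) B
        (by intro a ha; rcases List.mem_append.mp ha with h | h
            · exact hA a h
            · simp at h; subst h; exact h0)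
        hB (fun y hy => hxs y (by simp [hy]))]
      simp [h0]
    · have hall : ∀ y ∈ A ++ B, (fun a b => decide (pvRank a < pvRank b)) x y = false := by
        intro y hy
        rcases List.mem_append.mp hy with h | h
        · simp [hA y h, h1]
        · simp [hB y h, h1]
      rw [PySem.List.insertBy_of_forall_not_before _ _ _ hall, List.append_assoc]
      rw [ih A (B ++ [x]) hA
        (by intro b hb; rcases List.mem_append.mp hb with h | h
            · exact hB b h
            · simp at h; subst h; exact h1)
        (fun y hy => hxs y (by simp [hy]))]
      simp [h1]

-- the sorted kept list is exactly highs (in order) followed by mediums (in order)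
lemma pv_sorted_eq (all_skills : List (List (String × String))) :
    PySem.List.sorted (all_skills.filter pvInRank) pvRank false
      = all_skills.filter (fun s => pvGetPriority s == some "high")
        ++ all_skills.filter (fun s => pvGetPriority s == some "medium") := by
  rw [PySem.List.sorted_eq_foldl_insertBy]
  have h := pv_foldl_ins (all_skills.filter pvInRank) [] []
      (by simp) (by simp)
      (by intro x hx; exact (pvInRank_iff x).mp (List.of_mem_filter hx))
  simp only [List.nil_append] at h
  rw [h]
  congr 1
  · rw [List.filter_filter]
    apply List.filter_congr
    intro s _
    by_cases h0 : pvRank s = 0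
    · simp [h0, (pvRank_high s).mp h0, (pvInRank_iff s).mpr (Or.inl h0)]
    · have e : (pvRank s == 0) = false := by simp [h0]
      have hn : ¬ pvGetPriority s = some "high" := fun hc => h0 ((pvRank_high s).mpr hc)
      have e' : (pvGetPriority s == some "high") = false := by simp [hn]
      simp [e, e']
  · rw [List.filter_filter]
    apply List.filter_congr
    intro s _
    by_cases h1 : pvRank s = 1
    · simp [h1, (pvRank_medium s).mp h1, (pvInRank_iff s).mpr (Or.inr h1)]
    · have e : (pvRank s == 1) = false := by simp [h1]
      have hn : ¬ pvGetPriority s = some "medium" := fun hc => h1 ((pvRank_medium s).mpr hc)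
      have e' : (pvGetPriority s == some "medium") = false := by simp [hn]
      simp [e, e']

-- ===== VERDICT (by name: the statement is the Claim_ definition above) =====
theorem identify_priority_skills_py_spec : Claim_equal_identify_priority_skills_py := by
  intro all_skills target_roles target_industries _
  unfold Spec_identify_priority_skills_py
  simp only [identify_priority_skills_py, identify_priority_skills_py_alt]
  rw [pv_sorted_eq]
  set H := all_skills.filter (fun s => pvGetPriority s == some "high") with hH
  set M := all_skills.filter (fun s => pvGetPriority s == some "medium") with hM
  have hsliceH : PySem.List.slice H none (some 20) = H.take 20 := by
    exact_mod_cast PySem.List.slice_to_natCast H 20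
  have hsliceHM : PySem.List.slice (H ++ M) none (some 20) = (H ++ M).take 20 := by
    exact_mod_cast PySem.List.slice_to_natCast (H ++ M) 20
  rw [hsliceH, hsliceHM, List.take_append]
  by_cases hlen : H.length < 20
  · have htake : (H.take 20).length = H.length := by rw [List.length_take]; omega
    rw [if_pos (by omega)]
    have htakeH : H.take 20 = H := List.take_of_length_le (le_of_lt hlen)
    rw [htakeH]
    congr 1
    have hcast : (20 - (H.length : Int)) = ((20 - H.length : Nat) : Int) := by omega
    rw [hcast, PySem.List.slice_to_natCast]
  · have htake : (H.take 20).length = 20 := by rw [List.length_take]; omega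
    rw [if_neg (by omega)]
    have : 20 - H.length = 0 := by omega
    simp [this]
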